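-- pv_equiv track=rewrite | github.com/AimadOufares/uca_digital_assistant | rag_module/audit/raw_quality_pipeline.py | pick_primary_reason
-- ===== SOURCE A (Python) =====
-- from typing import Dict, Iterable, List, Optional, Set, Tuple
--
-- def pick_primary_reason(flags: List[str]) -> str:
--     priority = [
--         "lang_not_allowed",
--         "lang_conf_low",
--         "encoding_broken",
--         "structural_noise",
--         "off_topic",
--         "too_short_words",
--         "too_short_chars",
--         "alpha_ratio_low",
--         "symbol_ratio_high",
--         "digit_ratio_high",
--         "lexical_diversity_low",
--         "too_many_urls",
--         "quality_score_low",
--     ]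
--     for key in priority:
--         if key in flags:
--             return key
--     for flag in flags:
--         if flag.startswith("exact_duplicate_of"):
--             return "exact_duplicate"
--     for flag in flags:
--         if flag.startswith("near_duplicate_of"):
--             return "near_duplicate"
--     return "other"
-- ===== SOURCE B (Python) =====
-- def pick_primary_reason(flags):
--     priority = [
--         "lang_not_allowed",
--         "lang_conf_low",
--         "encoding_broken",
--         "structural_noise",
--         "off_topic",
--         "too_short_words",
--         "too_short_chars",
--         "alpha_ratio_low",
--         "symbol_ratio_high",
--         "digit_ratio_high",
--         "lexical_diversity_low",
--         "too_many_urls",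
--         "quality_score_low",
--     ]
--     rank = {key: i for i, key in enumerate(priority)}
--     best_rank = None
--     best_key = None
--     has_exact = False
--     has_near = False
--     for flag in flags:
--         r = rank.get(flag)
--         if r is not None:
--             if best_rank is None or r < best_rank:
--                 best_rank = r
--                 best_key = flag
--         elif flag.startswith("exact_duplicate_of"):
--             has_exact = True
--         elif flag.startswith("near_duplicate_of"):
--             has_near = True
--     if best_key is not None:
--         return best_key
--     if has_exact:
--         return "exact_duplicate"
--     if has_near:
--         return "near_duplicate"
--     return "other"
-- ===== Notes on version B (the rewrite author's own statement) =====
-- stated objective: alternative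
-- what changed: Replaces A's three sequential scans of flags (one membership test per priority key plus two prefix scans) by a single pass over flags that maintains a running min-rank/best-key via a precomputed rank dict plus two prefix booleans, deciding exact-before-near precedence after the loop.
import Mathlib
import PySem

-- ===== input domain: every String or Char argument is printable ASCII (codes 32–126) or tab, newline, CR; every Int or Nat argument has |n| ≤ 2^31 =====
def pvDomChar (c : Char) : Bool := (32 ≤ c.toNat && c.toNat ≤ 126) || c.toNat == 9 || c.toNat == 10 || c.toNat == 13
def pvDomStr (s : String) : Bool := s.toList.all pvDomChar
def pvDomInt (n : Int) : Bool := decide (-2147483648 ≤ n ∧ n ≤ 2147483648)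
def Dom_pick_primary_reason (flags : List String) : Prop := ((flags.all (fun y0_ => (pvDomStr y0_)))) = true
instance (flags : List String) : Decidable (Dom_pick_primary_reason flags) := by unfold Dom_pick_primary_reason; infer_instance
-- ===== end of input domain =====

-- B replaces A's three sequential scans of flags by one accumulating pass (running min-rank/best-key via a rank dict, plus two prefix booleans decided after the loop); objective: alternative decomposition.

-- ===== PORT A =====
-- the priority list literal shared by both ports (pure data)
def priorityList : List String :=
  ["lang_not_allowed", "lang_conf_low", "encoding_broken", "structural_noise", "off_topic", "too_short_words", "too_short_chars", "alpha_ratio_low", "symbol_ratio_high", "digit_ratio_high", "lexical_diversity_low", "too_many_urls", "quality_score_low"]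

-- 'for key in priority: if key in flags: return key'
def aFindPriority : List String → List String → Option String
  | [], _ => none
  | k :: ks, fl => if fl.contains k then some k else aFindPriority ks fl

-- 'for flag in flags: if flag.startswith("exact_duplicate_of"): return "exact_duplicate"'
def aLoopExact : List String → Option String
  | [] => none
  | f :: fs => if PySem.Str.startswith f "exact_duplicate_of" then some "exact_duplicate" else aLoopExact fs

-- 'for flag in flags: if flag.startswith("near_duplicate_of"): return "near_duplicate"'
def aLoopNear : List String → Option String
  | [] => none
  | f :: fs => if PySem.Str.startswith f "near_duplicate_of" then some "near_duplicate" else aLoopNear fs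

def pick_primary_reason (flags : List String) : String :=
  match aFindPriority priorityList flags with
  | some k => k
  | none =>
    match aLoopExact flags with
    | some s => s
    | none =>
      match aLoopNear flags with
      | some s => s
      | none => "other"

-- ===== PORT B =====
-- rank = {key: i for i, key in enumerate(priority)}
def bRank : PySem.Dict String Int :=
  (PySem.List.enumerate priorityList 0).foldl (fun d p => d.insert p.2 p.1) PySem.Dict.empty

-- B's loop body; state = (best_rank, best_key, has_exact, has_near)
def bStep : (Option Int × Option String × Bool × Bool) → String → (Option Int × Option String × Bool × Bool)
  | (b, k, he, hn), flag =>
    match bRank.get? flag with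
    | some r =>
      match b with
      | none => (some r, some flag, he, hn)
      | some bb => if r < bb then (some r, some flag, he, hn) else (some bb, k, he, hn)
    | none =>
      if PySem.Str.startswith flag "exact_duplicate_of" then (b, k, true, hn)
      else if PySem.Str.startswith flag "near_duplicate_of" then (b, k, he, true)
      else (b, k, he, hn)

def pick_primary_reason_alt (flags : List String) : String :=
  let st := flags.foldl bStep (none, none, false, false)
  match st.2.1 with
  | some k => k
  | none =>
    if st.2.2.1 then "exact_duplicate"
    else if st.2.2.2 then "near_duplicate"
    else "other"

-- ===== PRECONDITION & SPEC =====
def Spec_pick_primary_reason (flags : List String) (out : String) : Prop := out = pick_primary_reason_alt flags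
instance (flags : List String) (out : String) : Decidable (Spec_pick_primary_reason flags out) := by unfold Spec_pick_primary_reason; infer_instance

-- ===== CLAIM (what is proved, stated in full; the proofs are below) =====
def Claim_equal_pick_primary_reason : Prop := ∀ (flags : List String), Dom_pick_primary_reason flags → Spec_pick_primary_reason flags (pick_primary_reason flags)

-- ===== LEMMAS AND PROOFS =====

-- the rank dict as a literal association list
def rankPairs : List (String × Int) :=
  [("lang_not_allowed", 0),
   ("lang_conf_low", 1),
   ("encoding_broken", 2),
   ("structural_noise", 3),
   ("off_topic", 4),
   ("too_short_words", 5),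
   ("too_short_chars", 6),
   ("alpha_ratio_low", 7),
   ("symbol_ratio_high", 8),
   ("digit_ratio_high", 9),
   ("lexical_diversity_low", 10),
   ("too_many_urls", 11),
   ("quality_score_low", 12)]

set_option maxHeartbeats 2000000 in
theorem bRank_eq : bRank = PySem.Dict.mk rankPairs := by decide

-- the unique key of a given rank
def keyOf (r : Int) : String :=
  (((rankPairs.find? (fun p => p.2 == r)).map Prod.fst).getD "")

theorem get?_mem (f : String) (r : Int) (h : bRank.get? f = some r) : (f, r) ∈ rankPairs := by
  rw [bRank_eq] at h
  simpa using PySem.Dict.mem_items_of_get?_eq_some _ h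

theorem keyOf_get (f : String) (r : Int) (h : bRank.get? f = some r) : f = keyOf r := by
  have hall : ∀ p ∈ rankPairs, p.1 = keyOf p.2 := by decide
  exact hall (f, r) (get?_mem f r h)

theorem get?_key : ∀ p ∈ rankPairs, bRank.get? p.1 = some p.2 := by
  rw [bRank_eq]; decide

def omin : Option Int → Option Int → Option Int
  | none, b => b
  | some a, none => some a
  | some a, some b => some (min a b)

def minRank : List String → Option Int
  | [] => none
  | f :: fs => omin (bRank.get? f) (minRank fs)

def heOf (fl : List String) : Bool :=
  fl.any (fun f => (bRank.get? f).isNone && PySem.Str.startswith f "exact_duplicate_of")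

def hnOf (fl : List String) : Bool :=
  fl.any (fun f => (bRank.get? f).isNone && !PySem.Str.startswith f "exact_duplicate_of"
            && PySem.Str.startswith f "near_duplicate_of")

theorem omin_some_some (a c : Int) (m : Option Int) :
    omin (some a) (omin (some c) m) = omin (some (min a c)) m := by
  cases m <;> simp [omin, min_assoc]

theorem bool_eq_false {b : Bool} (h : ¬ b = true) : b = false := by
  cases b
  · rfl
  · exact absurd rfl h

theorem fold_spec : ∀ (fl : List String) (b : Option Int) (he hn : Bool),
    fl.foldl bStep (b, b.map keyOf, he, hn) =
      (omin b (minRank fl), (omin b (minRank fl)).map keyOf, he || heOf fl, hn || hnOf fl) := by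
  intro fl
  induction fl with
  | nil =>
    intro b he hn
    cases b <;> simp [minRank, heOf, hnOf, omin]
  | cons f fs ih =>
    intro b he hn
    rw [List.foldl_cons]
    cases hr : bRank.get? f with
    | some r =>
      have hk := keyOf_get f r hr
      have hmr : minRank (f :: fs) = omin (some r) (minRank fs) := by rw [minRank, hr]
      have hhe : heOf (f :: fs) = heOf fs := by
        simp only [heOf, List.any_cons, hr, Option.isNone_some, Bool.false_and, Bool.false_or]
      have hhn : hnOf (f :: fs) = hnOf fs := by
        simp only [hnOf, List.any_cons, hr, Option.isNone_some, Bool.false_and, Bool.false_or]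
      rw [hmr, hhe, hhn]
      cases b with
      | none =>
        have hb : bStep (none, Option.map keyOf none, he, hn) f
            = (some r, Option.map keyOf (some r), he, hn) := by
          simp only [bStep, hr, Option.map_some]
          rw [hk]
        rw [hb, ih]
        rfl
      | some bb =>
        by_cases hlt : r < bb
        · have hb : bStep (some bb, Option.map keyOf (some bb), he, hn) f
              = (some r, Option.map keyOf (some r), he, hn) := by
            simp only [bStep, hr, Option.map_some]
            rw [if_pos hlt, hk]
          rw [hb, ih, omin_some_some]
          have hmin : min bb r = r := by omega
          rw [hmin]
        · have hb : bStep (some bb, Option.map keyOf (some bb), he, hn) f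
              = (some bb, Option.map keyOf (some bb), he, hn) := by
            simp only [bStep, hr, Option.map_some]
            rw [if_neg hlt]
          rw [hb, ih, omin_some_some]
          have hmin : min bb r = bb := by omega
          rw [hmin]
    | none =>
      have hmr : minRank (f :: fs) = minRank fs := by rw [minRank, hr]; rfl
      rw [hmr]
      by_cases he1 : PySem.Str.startswith f "exact_duplicate_of" = true
      · have hb : bStep (b, b.map keyOf, he, hn) f = (b, b.map keyOf, true, hn) := by
          simp only [bStep, hr]
          rw [if_pos he1]
        rw [hb, ih]
        have h1 : heOf (f :: fs) = true := by
          simp only [heOf, List.any_cons, hr, Option.isNone_none, Bool.true_and, he1, Bool.true_or]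
        have h2 : hnOf (f :: fs) = hnOf fs := by
          simp only [hnOf, List.any_cons, hr, Option.isNone_none, Bool.true_and, he1,
            Bool.not_true, Bool.false_and, Bool.false_or]
        rw [h1, h2]
        simp
      · by_cases hn1 : PySem.Str.startswith f "near_duplicate_of" = true
        · have hb : bStep (b, b.map keyOf, he, hn) f = (b, b.map keyOf, he, true) := by
            simp only [bStep, hr]
            rw [if_neg he1, if_pos hn1]
          rw [hb, ih]
          have he1f := bool_eq_false he1
          have h1 : heOf (f :: fs) = heOf fs := by
            simp only [heOf, List.any_cons, hr, Option.isNone_none, Bool.true_and, he1f, Bool.false_or]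
          have h2 : hnOf (f :: fs) = true := by
            simp only [hnOf, List.any_cons, hr, Option.isNone_none, Bool.true_and, he1f,
              Bool.not_false, Bool.true_and, hn1, Bool.true_or]
          rw [h1, h2]
          simp
        · have hb : bStep (b, b.map keyOf, he, hn) f = (b, b.map keyOf, he, hn) := by
            simp only [bStep, hr]
            rw [if_neg he1, if_neg hn1]
          rw [hb, ih]
          have he1f := bool_eq_false he1
          have hn1f := bool_eq_false hn1
          have h1 : heOf (f :: fs) = heOf fs := by
            simp only [heOf, List.any_cons, hr, Option.isNone_none, Bool.true_and, he1f, Bool.false_or]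
          have h2 : hnOf (f :: fs) = hnOf fs := by
            simp only [hnOf, List.any_cons, hr, Option.isNone_none, Bool.true_and, he1f,
              Bool.not_false, Bool.true_and, hn1f, Bool.false_or]
          rw [h1, h2]

theorem omin_eq_none (a b : Option Int) : omin a b = none ↔ a = none ∧ b = none := by
  cases a <;> cases b <;> simp [omin]

theorem minRank_none (fl : List String) (h : minRank fl = none) :
    ∀ f ∈ fl, bRank.get? f = none := by
  induction fl with
  | nil => simp
  | cons f fs ih =>
    rw [minRank, omin_eq_none] at h
    intro g hg
    rcases List.mem_cons.mp hg with rfl | hg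
    · exact h.1
    · exact ih h.2 g hg

theorem minRank_mem (fl : List String) (r : Int) (h : minRank fl = some r) :
    ∃ f ∈ fl, bRank.get? f = some r := by
  induction fl generalizing r with
  | nil => cases h
  | cons f fs ih =>
    rw [minRank] at h
    cases hr : bRank.get? f <;> rw [hr] at h
    · obtain ⟨g, hg, hgr⟩ := ih r h
      exact ⟨g, List.mem_cons_of_mem _ hg, hgr⟩
    · rename_i a
      cases hm : minRank fs <;> rw [hm] at h <;> simp only [omin, Option.some.injEq] at h
      · exact ⟨f, List.mem_cons_self, by rw [hr, h]⟩
      · rename_i m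
        rcases le_total a m with hle | hle
        · have hma : min a m = a := by omega
          rw [hma] at h
          exact ⟨f, List.mem_cons_self, by rw [hr, h]⟩
        · have hma : min a m = m := by omega
          rw [hma] at h
          obtain ⟨g, hg, hgr⟩ := ih m hm
          exact ⟨g, List.mem_cons_of_mem _ hg, by rw [hgr, h]⟩

theorem minRank_le (fl : List String) (r : Int) (h : minRank fl = some r) :
    ∀ g ∈ fl, ∀ r', bRank.get? g = some r' → r ≤ r' := by
  induction fl generalizing r with
  | nil => simp
  | cons f fs ih =>
    rw [minRank] at h
    intro g hg r' hgr
    cases hr : bRank.get? f <;> rw [hr] at h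
    · rcases List.mem_cons.mp hg with rfl | hg
      · rw [hr] at hgr; cases hgr
      · exact ih _ h g hg r' hgr
    · rename_i a
      cases hm : minRank fs <;> rw [hm] at h <;> simp only [omin, Option.some.injEq] at h
      · rcases List.mem_cons.mp hg with rfl | hg
        · rw [hr] at hgr
          injection hgr with h2
          omega
        · have := minRank_none fs hm g hg
          rw [this] at hgr
          cases hgr
      · rename_i m
        have hm1 := min_le_left a m
        have hm2 := min_le_right a m
        rcases List.mem_cons.mp hg with rfl | hg
        · rw [hr] at hgr
          injection hgr with h3
          omega
        · have := ih m hm g hg r' hgr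
          omega

theorem any_congr_mem {l : List String} {p q : String → Bool} (h : ∀ x ∈ l, p x = q x) :
    l.any p = l.any q := by
  induction l with
  | nil => rfl
  | cons x xs ih =>
    simp only [List.any_cons, h x List.mem_cons_self,
      ih (fun y hy => h y (List.mem_cons_of_mem _ hy))]

theorem aFind_none (ks fl : List String) (h : ∀ k ∈ ks, fl.contains k = false) :
    aFindPriority ks fl = none := by
  induction ks with
  | nil => rfl
  | cons k ks ih =>
    rw [aFindPriority, h k List.mem_cons_self, if_neg (by simp),
      ih (fun k' hk' => h k' (List.mem_cons_of_mem _ hk'))]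

theorem contains_of_not_false {fl : List String} {k : String}
    (h : ¬ fl.contains k = false) : k ∈ fl := by
  cases hc : fl.contains k with
  | false => exact absurd hc h
  | true => exact List.mem_of_elem_eq_true hc

theorem crux (fl : List String) :
    aFindPriority priorityList fl = (minRank fl).map keyOf := by
  cases hm : minRank fl with
  | none =>
    have hnone := minRank_none fl hm
    have hkey : ∀ k ∈ priorityList, ∃ p ∈ rankPairs, p.1 = k := by decide
    rw [Option.map_none]
    apply aFind_none
    intro k hk
    by_contra hcon
    have hkm : k ∈ fl := contains_of_not_false hcon
    obtain ⟨p, hp, rfl⟩ := hkey k hk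
    exact absurd (hnone p.1 hkm) (by simp [get?_key p hp])
  | some r =>
    obtain ⟨f, hf, hfr⟩ := minRank_mem fl r hm
    have hle := minRank_le fl r hm
    have hlt : ∀ (k : String) (j : Int), bRank.get? k = some j → j < r → fl.contains k = false := by
      intro k j hkj hj
      by_contra hcon
      exact absurd (hle k (contains_of_not_false hcon) j hkj) (by omega)
    have g0 : bRank.get? "lang_not_allowed" = some 0 := get?_key ("lang_not_allowed", 0) (by decide)
    have g1 : bRank.get? "lang_conf_low" = some 1 := get?_key ("lang_conf_low", 1) (by decide)
    have g2 : bRank.get? "encoding_broken" = some 2 := get?_key ("encoding_broken", 2) (by decide)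
    have g3 : bRank.get? "structural_noise" = some 3 := get?_key ("structural_noise", 3) (by decide)
    have g4 : bRank.get? "off_topic" = some 4 := get?_key ("off_topic", 4) (by decide)
    have g5 : bRank.get? "too_short_words" = some 5 := get?_key ("too_short_words", 5) (by decide)
    have g6 : bRank.get? "too_short_chars" = some 6 := get?_key ("too_short_chars", 6) (by decide)
    have g7 : bRank.get? "alpha_ratio_low" = some 7 := get?_key ("alpha_ratio_low", 7) (by decide)
    have g8 : bRank.get? "symbol_ratio_high" = some 8 := get?_key ("symbol_ratio_high", 8) (by decide)
    have g9 : bRank.get? "digit_ratio_high" = some 9 := get?_key ("digit_ratio_high", 9) (by decide)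
    have g10 : bRank.get? "lexical_diversity_low" = some 10 := get?_key ("lexical_diversity_low", 10) (by decide)
    have g11 : bRank.get? "too_many_urls" = some 11 := get?_key ("too_many_urls", 11) (by decide)
    have g12 : bRank.get? "quality_score_low" = some 12 := get?_key ("quality_score_low", 12) (by decide)
    have hp := get?_mem f r hfr
    simp only [rankPairs, List.mem_cons, List.not_mem_nil, or_false] at hp
    rcases hp with hp | hp | hp | hp | hp | hp | hp | hp | hp | hp | hp | hp | hp
    · obtain ⟨rfl, rfl⟩ := Prod.mk.inj hp
      simp only [priorityList, aFindPriority]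
      simp [hf, show keyOf 0 = "lang_not_allowed" from by decide]
    · obtain ⟨rfl, rfl⟩ := Prod.mk.inj hp
      simp only [priorityList, aFindPriority, hlt _ _ g0 (by decide)]
      simp [hf, show keyOf 1 = "lang_conf_low" from by decide]
    · obtain ⟨rfl, rfl⟩ := Prod.mk.inj hp
      simp only [priorityList, aFindPriority, hlt _ _ g0 (by decide), hlt _ _ g1 (by decide)]
      simp [hf, show keyOf 2 = "encoding_broken" from by decide]
    · obtain ⟨rfl, rfl⟩ := Prod.mk.inj hp
      simp only [priorityList, aFindPriority, hlt _ _ g0 (by decide), hlt _ _ g1 (by decide), hlt _ _ g2 (by decide)]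
      simp [hf, show keyOf 3 = "structural_noise" from by decide]
    · obtain ⟨rfl, rfl⟩ := Prod.mk.inj hp
      simp only [priorityList, aFindPriority, hlt _ _ g0 (by decide), hlt _ _ g1 (by decide), hlt _ _ g2 (by decide), hlt _ _ g3 (by decide)]
      simp [hf, show keyOf 4 = "off_topic" from by decide]
    · obtain ⟨rfl, rfl⟩ := Prod.mk.inj hp
      simp only [priorityList, aFindPriority, hlt _ _ g0 (by decide), hlt _ _ g1 (by decide), hlt _ _ g2 (by decide), hlt _ _ g3 (by decide), hlt _ _ g4 (by decide)]
      simp [hf, show keyOf 5 = "too_short_words" from by decide]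
    · obtain ⟨rfl, rfl⟩ := Prod.mk.inj hp
      simp only [priorityList, aFindPriority, hlt _ _ g0 (by decide), hlt _ _ g1 (by decide), hlt _ _ g2 (by decide), hlt _ _ g3 (by decide), hlt _ _ g4 (by decide), hlt _ _ g5 (by decide)]
      simp [hf, show keyOf 6 = "too_short_chars" from by decide]
    · obtain ⟨rfl, rfl⟩ := Prod.mk.inj hp
      simp only [priorityList, aFindPriority, hlt _ _ g0 (by decide), hlt _ _ g1 (by decide), hlt _ _ g2 (by decide), hlt _ _ g3 (by decide), hlt _ _ g4 (by decide), hlt _ _ g5 (by decide), hlt _ _ g6 (by decide)]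
      simp [hf, show keyOf 7 = "alpha_ratio_low" from by decide]
    · obtain ⟨rfl, rfl⟩ := Prod.mk.inj hp
      simp only [priorityList, aFindPriority, hlt _ _ g0 (by decide), hlt _ _ g1 (by decide), hlt _ _ g2 (by decide), hlt _ _ g3 (by decide), hlt _ _ g4 (by decide), hlt _ _ g5 (by decide), hlt _ _ g6 (by decide), hlt _ _ g7 (by decide)]
      simp [hf, show keyOf 8 = "symbol_ratio_high" from by decide]
    · obtain ⟨rfl, rfl⟩ := Prod.mk.inj hp
      simp only [priorityList, aFindPriority, hlt _ _ g0 (by decide), hlt _ _ g1 (by decide), hlt _ _ g2 (by decide), hlt _ _ g3 (by decide), hlt _ _ g4 (by decide), hlt _ _ g5 (by decide), hlt _ _ g6 (by decide), hlt _ _ g7 (by decide), hlt _ _ g8 (by decide)]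
      simp [hf, show keyOf 9 = "digit_ratio_high" from by decide]
    · obtain ⟨rfl, rfl⟩ := Prod.mk.inj hp
      simp only [priorityList, aFindPriority, hlt _ _ g0 (by decide), hlt _ _ g1 (by decide), hlt _ _ g2 (by decide), hlt _ _ g3 (by decide), hlt _ _ g4 (by decide), hlt _ _ g5 (by decide), hlt _ _ g6 (by decide), hlt _ _ g7 (by decide), hlt _ _ g8 (by decide), hlt _ _ g9 (by decide)]
      simp [hf, show keyOf 10 = "lexical_diversity_low" from by decide]
    · obtain ⟨rfl, rfl⟩ := Prod.mk.inj hp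
      simp only [priorityList, aFindPriority, hlt _ _ g0 (by decide), hlt _ _ g1 (by decide), hlt _ _ g2 (by decide), hlt _ _ g3 (by decide), hlt _ _ g4 (by decide), hlt _ _ g5 (by decide), hlt _ _ g6 (by decide), hlt _ _ g7 (by decide), hlt _ _ g8 (by decide), hlt _ _ g9 (by decide), hlt _ _ g10 (by decide)]
      simp [hf, show keyOf 11 = "too_many_urls" from by decide]
    · obtain ⟨rfl, rfl⟩ := Prod.mk.inj hp
      simp only [priorityList, aFindPriority, hlt _ _ g0 (by decide), hlt _ _ g1 (by decide), hlt _ _ g2 (by decide), hlt _ _ g3 (by decide), hlt _ _ g4 (by decide), hlt _ _ g5 (by decide), hlt _ _ g6 (by decide), hlt _ _ g7 (by decide), hlt _ _ g8 (by decide), hlt _ _ g9 (by decide), hlt _ _ g10 (by decide), hlt _ _ g11 (by decide)]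
      simp [hf, show keyOf 12 = "quality_score_low" from by decide]

theorem aLoopExact_eq (fl : List String) :
    aLoopExact fl = if fl.any (fun f => PySem.Str.startswith f "exact_duplicate_of") then some "exact_duplicate" else none := by
  induction fl with
  | nil => simp [aLoopExact]
  | cons f fs ih =>
    simp only [aLoopExact, List.any_cons, ih]
    by_cases h : PySem.Str.startswith f "exact_duplicate_of" = true
    · rw [if_pos h, if_pos (by rw [h, Bool.true_or])]
    · have hf : PySem.Str.startswith f "exact_duplicate_of" = false := by
        cases hc : PySem.Str.startswith f "exact_duplicate_of"
        · rfl
        · exact absurd hc h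
      rw [if_neg h]
      simp only [hf, Bool.false_or]

theorem aLoopNear_eq (fl : List String) :
    aLoopNear fl = if fl.any (fun f => PySem.Str.startswith f "near_duplicate_of") then some "near_duplicate" else none := by
  induction fl with
  | nil => simp [aLoopNear]
  | cons f fs ih =>
    simp only [aLoopNear, List.any_cons, ih]
    by_cases h : PySem.Str.startswith f "near_duplicate_of" = true
    · rw [if_pos h, if_pos (by rw [h, Bool.true_or])]
    · have hf : PySem.Str.startswith f "near_duplicate_of" = false := by
        cases hc : PySem.Str.startswith f "near_duplicate_of"
        · rfl
        · exact absurd hc h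
      rw [if_neg h]
      simp only [hf, Bool.false_or]

theorem main_eq (flags : List String) :
    pick_primary_reason flags = pick_primary_reason_alt flags := by
  have hfold := fold_spec flags none false false
  simp only [Option.map_none, Bool.false_or] at hfold
  simp only [pick_primary_reason, pick_primary_reason_alt, hfold, crux]
  cases hm : minRank flags with
  | some r => rfl
  | none =>
    have hnone := minRank_none flags hm
    simp only [omin, Option.map_none]
    have hhe : heOf flags = flags.any (fun f => PySem.Str.startswith f "exact_duplicate_of") := by
      apply any_congr_mem
      intro x hx
      simp only [hnone x hx, Option.isNone_none, Bool.true_and]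
    rw [aLoopExact_eq, hhe]
    cases hany : flags.any (fun f => PySem.Str.startswith f "exact_duplicate_of") with
    | true => rfl
    | false =>
      have hhn : hnOf flags = flags.any (fun f => PySem.Str.startswith f "near_duplicate_of") := by
        apply any_congr_mem
        intro x hx
        have hx1 : PySem.Str.startswith x "exact_duplicate_of" = false := by
          have := List.any_eq_false.mp hany x hx
          simpa using this
        simp only [hnone x hx, Option.isNone_none, Bool.true_and, hx1,
          Bool.not_false, Bool.true_and]
      rw [aLoopNear_eq, hhn]
      cases hn2 : flags.any (fun f => PySem.Str.startswith f "near_duplicate_of") <;> rfl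

-- ===== VERDICT (by name: the statement is the Claim_ definition above) =====
theorem pick_primary_reason_spec : Claim_equal_pick_primary_reason := by
  intro flags _
  unfold Spec_pick_primary_reason
  exact main_eq flags
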